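-- pv_equiv track=rewrite | github.com/Vishal-251044/Paarsh-Matrimony | backend/app/controllers/matches_controller.py | _check_profession_match
-- ===== SOURCE A (Python) =====
-- def _check_profession_match(actual_prof: str, pref_prof: str) -> bool:
--     """Check if actual profession matches preference"""
--     actual = actual_prof.lower()
--     pref = pref_prof.lower()
--
--     # Exact match
--     if actual == pref:
--         return True
--
--     # Check if actual contains preference
--     if pref in actual:
--         return True
--
--     # Check profession categories
--     prof_categories = {
--         'engineer': ['engineer', 'software', 'developer', 'programmer'],
--         'doctor': ['doctor', 'surgeon', 'physician'],
--         'teacher': ['teacher', 'professor', 'lecturer'],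
--         'business': ['business', 'entrepreneur', 'trader'],
--         'government': ['government', 'officer', 'administrative']
--     }
--
--     # Check if both are in same category
--     for category, terms in prof_categories.items():
--         actual_in_category = any(term in actual for term in terms)
--         pref_in_category = any(term in pref for term in terms)
--         if actual_in_category and pref_in_category:
--             return True
--
--     return False
-- ===== SOURCE B (Python) =====
-- _TERM_TO_CAT = {term: cat
--                 for cat, terms in {
--                     'engineer': ['engineer', 'software', 'developer', 'programmer'],
--                     'doctor': ['doctor', 'surgeon', 'physician'],
--                     'teacher': ['teacher', 'professor', 'lecturer'],
--                     'business': ['business', 'entrepreneur', 'trader'],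
--                     'government': ['government', 'officer', 'administrative']
--                 }.items()
--                 for term in terms}
--
--
-- def _check_profession_match(actual_prof: str, pref_prof: str) -> bool:
--     """Check if actual profession matches preference"""
--     actual = actual_prof.lower()
--     pref = pref_prof.lower()
--
--     # 'pref in actual' already covers the exact-match case.
--     if pref in actual:
--         return True
--
--     # Index the actual profession once: which categories does it hit?
--     actual_cats = {cat for term, cat in _TERM_TO_CAT.items() if term in actual}
--
--     # Stream the flat term list once for pref against that index.
--     return any(cat in actual_cats and term in pref
--                for term, cat in _TERM_TO_CAT.items())
-- ===== Notes on version B (the rewrite author's own statement) =====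
-- stated objective: alternative
-- what changed: Drops the redundant exact-equality guard (subsumed by 'pref in actual'), flattens the nested category dict into one term->category map, builds a category index for the actual string once, then streams the flat term list once against that index for pref, instead of A's per-category loop re-scanning both strings in each iteration.
import Mathlib
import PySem

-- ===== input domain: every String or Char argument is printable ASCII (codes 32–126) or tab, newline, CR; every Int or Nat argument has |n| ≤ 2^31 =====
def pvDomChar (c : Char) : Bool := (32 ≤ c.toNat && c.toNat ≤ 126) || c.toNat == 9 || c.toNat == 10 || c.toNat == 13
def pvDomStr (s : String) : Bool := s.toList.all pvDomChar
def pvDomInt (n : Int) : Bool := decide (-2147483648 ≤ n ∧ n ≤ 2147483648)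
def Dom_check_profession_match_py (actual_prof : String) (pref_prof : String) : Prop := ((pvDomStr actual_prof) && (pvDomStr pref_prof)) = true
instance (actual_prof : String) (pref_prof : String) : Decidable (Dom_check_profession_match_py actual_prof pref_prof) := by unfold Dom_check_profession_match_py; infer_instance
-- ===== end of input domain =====

-- B drops the equality guard (subsumed by the substring guard), flattens the category
-- dict into a term→category map, indexes the actual string's categories once and streams
-- the flat term list once for pref (objective: alternative).

-- ===== PORT A =====
-- the nested prof_categories dict literal of A
def pvProfCategories : List (String × List String) :=
  [("engineer", ["engineer", "software", "developer", "programmer"]),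
   ("doctor", ["doctor", "surgeon", "physician"]),
   ("teacher", ["teacher", "professor", "lecturer"]),
   ("business", ["business", "entrepreneur", "trader"]),
   ("government", ["government", "officer", "administrative"])]

def check_profession_match_py (actual_prof : String) (pref_prof : String) : Bool :=
  let actual := PySem.Str.lower actual_prof
  let pref := PySem.Str.lower pref_prof
  if actual == pref then true
  else if PySem.Str.isIn pref actual then true
  else
    -- for category, terms …: any(term in actual …) and any(term in pref …) → return True
    pvProfCategories.any (fun ct =>
      (ct.2.any (fun term => PySem.Str.isIn term actual)) &&
      (ct.2.any (fun term => PySem.Str.isIn term pref)))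

-- ===== PORT B =====
-- the flat _TERM_TO_CAT dict comprehension of Source B (all terms distinct, insertion order)
def pvTermToCat : List (String × String) :=
  pvProfCategories.flatMap (fun ct => ct.2.map (fun term => (term, ct.1)))

def check_profession_match_py_alt (actual_prof : String) (pref_prof : String) : Bool :=
  let actual := PySem.Str.lower actual_prof
  let pref := PySem.Str.lower pref_prof
  if PySem.Str.isIn pref actual then true
  else
    let actualCats : PySem.Set String :=
      PySem.Set.ofList ((pvTermToCat.filter (fun tc => PySem.Str.isIn tc.1 actual)).map Prod.snd)
    pvTermToCat.any (fun tc => PySem.Set.contains actualCats tc.2 && PySem.Str.isIn tc.1 pref)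

-- ===== PRECONDITION & SPEC =====
def Spec_check_profession_match_py (actual_prof : String) (pref_prof : String) (out : Bool) : Prop := out = check_profession_match_py_alt actual_prof pref_prof
instance (actual_prof : String) (pref_prof : String) (out : Bool) : Decidable (Spec_check_profession_match_py actual_prof pref_prof out) := by unfold Spec_check_profession_match_py; infer_instance

-- ===== CLAIM (what is proved, stated in full; the proofs are below) =====
def Claim_equal_check_profession_match_py : Prop := ∀ (actual_prof : String) (pref_prof : String), Dom_check_profession_match_py actual_prof pref_prof → Spec_check_profession_match_py actual_prof pref_prof (check_profession_match_py actual_prof pref_prof)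

-- ===== LEMMAS AND PROOFS =====

-- a string is a substring of itself, so A's equality guard is subsumed by its substring guard
theorem pv_isIn_self (l : List Char) : PySem.Chars.isIn l l = true := by
  rw [PySem.Chars.isIn_iff_infix]

-- category names of pvProfCategories are distinct: equal names force equal entries
theorem pv_cat_name_inj : ∀ ct ∈ pvProfCategories, ∀ ct' ∈ pvProfCategories,
    ct.1 = ct'.1 → ct = ct' := by decide

-- membership in the flat term→category list
theorem pv_mem_termToCat (tc : String × String) :
    tc ∈ pvTermToCat ↔ ∃ ct ∈ pvProfCategories, tc.1 ∈ ct.2 ∧ tc.2 = ct.1 := by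
  simp only [pvTermToCat, List.mem_flatMap, List.mem_map]
  constructor
  · rintro ⟨ct, hct, t, ht, rfl⟩; exact ⟨ct, hct, ht, rfl⟩
  · rintro ⟨ct, hct, h1, h2⟩
    exact ⟨ct, hct, tc.1, h1, by rw [← h2]⟩

-- A's per-category double-any loop equals B's index-then-stream pass, for any predicates
theorem pv_loop_eq (P Q : String → Bool) :
    pvProfCategories.any (fun ct => ct.2.any P && ct.2.any Q) =
    pvTermToCat.any (fun tc =>
      PySem.Set.contains
        (PySem.Set.ofList ((pvTermToCat.filter (fun tc' => P tc'.1)).map Prod.snd)) tc.2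
      && Q tc.1) := by
  apply Bool.eq_iff_iff.mpr
  simp only [List.any_eq_true, Bool.and_eq_true, PySem.Set.contains_iff,
    PySem.Set.mem_ofList, List.mem_map, List.mem_filter]
  constructor
  · rintro ⟨ct, hct, ⟨tp, htp, hP⟩, ⟨tq, htq, hQ⟩⟩
    refine ⟨(tq, ct.1), (pv_mem_termToCat _).mpr ⟨ct, hct, htq, rfl⟩,
      ⟨⟨(tp, ct.1), ⟨(pv_mem_termToCat _).mpr ⟨ct, hct, htp, rfl⟩, hP⟩, rfl⟩, hQ⟩⟩
  · rintro ⟨tc, htc, ⟨tc', ⟨htc', hP⟩, hsnd⟩, hQ⟩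
    obtain ⟨ct, hct, hmem, hcat⟩ := (pv_mem_termToCat _).mp htc
    obtain ⟨ct', hct', hmem', hcat'⟩ := (pv_mem_termToCat _).mp htc'
    have hee : ct' = ct := pv_cat_name_inj ct' hct' ct hct (by rw [← hcat', hsnd, hcat])
    subst hee
    exact ⟨ct', hct, ⟨tc'.1, hmem', hP⟩, ⟨tc.1, hmem, hQ⟩⟩

-- ===== VERDICT (by name: the statement is the Claim_ definition above) =====
theorem check_profession_match_py_spec : Claim_equal_check_profession_match_py := by
  intro actual_prof pref_prof _
  unfold Spec_check_profession_match_py check_profession_match_py check_profession_match_py_alt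
  by_cases h1 : (PySem.Str.lower actual_prof == PySem.Str.lower pref_prof) = true
  · have heq : PySem.Str.lower actual_prof = PySem.Str.lower pref_prof := by
      exact eq_of_beq h1
    simp [heq, pv_isIn_self]

  · by_cases h2 : PySem.Str.isIn (PySem.Str.lower pref_prof) (PySem.Str.lower actual_prof) = true
    · simp only [if_neg h1, if_pos h2]
    · simp only [if_neg h1, if_neg h2]
      exact pv_loop_eq _ _
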